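-- pv_equiv track=rewrite | github.com/ShaharEli/algoTrain | 2021AB/2021AB.py | get_ingredients_helper
-- ===== SOURCE A (Python) =====
-- def find_ingredient(recipes, item):
--     for recipe in recipes:
--         if item in recipe[1]:
--             return recipe[0]
--
--     return None
--
-- def get_ingredients_helper(final_item, recipes, curr):
--     next_ingridents = find_ingredient(recipes, final_item)
--     if not next_ingridents:
--         return curr
--     curr.remove(final_item)
--     for ingredient in next_ingridents:
--         curr.add(ingredient)
--         get_ingredients_helper(ingredient, recipes, curr)
--     return curr
-- ===== SOURCE B (Python) =====
-- def find_ingredient(recipes, item):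
--     for recipe in recipes:
--         if item in recipe[1]:
--             return recipe[0]
--
--     return None
--
-- def get_ingredients_helper(final_item, recipes, curr):
--     # Iterative rewrite: explicit LIFO stack of pending items instead of recursion.
--     # Mutates curr in place, like the original.
--     rec = find_ingredient(recipes, final_item)
--     if not rec:
--         return curr
--     curr.remove(final_item)
--     stack = list(reversed(rec))
--     while stack:
--         item = stack.pop()
--         curr.add(item)
--         r = find_ingredient(recipes, item)
--         if not r:
--             continue
--         curr.remove(item)
--         stack.extend(reversed(r))
--     return curr
-- ===== Notes on version B (the rewrite author's own statement) =====
-- stated objective: alternative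
-- what changed: Replaces A's recursion with an explicit LIFO stack of pending items (children pushed in reverse), keeping A's exact pre-order expansion and set mutations; Pre_ excludes exactly the inputs where A raises (KeyError: expandable final_item not in curr; RecursionError: a cycle reachable from final_item in the recipe graph).
import Mathlib
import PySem

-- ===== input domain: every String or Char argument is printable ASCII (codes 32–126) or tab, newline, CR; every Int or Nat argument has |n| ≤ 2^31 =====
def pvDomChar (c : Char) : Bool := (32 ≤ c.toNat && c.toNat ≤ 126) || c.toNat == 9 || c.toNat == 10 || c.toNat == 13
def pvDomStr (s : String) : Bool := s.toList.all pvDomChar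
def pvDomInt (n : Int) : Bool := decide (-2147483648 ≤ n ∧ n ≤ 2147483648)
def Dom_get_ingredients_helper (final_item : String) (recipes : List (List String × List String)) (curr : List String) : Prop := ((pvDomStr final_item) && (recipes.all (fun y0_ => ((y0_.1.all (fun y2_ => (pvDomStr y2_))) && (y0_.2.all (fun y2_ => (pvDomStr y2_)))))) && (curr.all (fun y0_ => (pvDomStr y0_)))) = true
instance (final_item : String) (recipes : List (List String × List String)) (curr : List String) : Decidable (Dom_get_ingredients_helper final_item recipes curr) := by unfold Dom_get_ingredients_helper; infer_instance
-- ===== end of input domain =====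

-- B replaces A's recursion by an explicit LIFO stack of pending items (same pre-order,
-- same set mutations); equivalence is about the returned value (both Pythons mutate curr in place).

-- ===== PORT A =====
-- find_ingredient: first recipe whose product list contains item; returns its ingredient list.
def find_ingredient (recipes : List (List String × List String)) (item : String) : Option (List String) :=
  match recipes with
  | [] => none
  | recipe :: rest => if item ∈ recipe.2 then some recipe.1 else find_ingredient rest item

-- Fuel bound for the ports' totality guard: under Pre_ (no cycle reachable from
-- final_item) A's recursion depth never exceeds 1 + the total number of ingredient
-- occurrences, so this fuel is never exhausted inside Pre_.
def fuelBound (recipes : List (List String × List String)) : Nat :=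
  (recipes.map (fun r => r.1.length)).sum + 2

-- goA = A's recursive body, with a fuel counter as a pure totality guard (Python A raises
-- RecursionError on a cycle reachable from final_item; within Pre_ the fuel fuelBound is
-- never exhausted).  Python's curr.remove(item) raises KeyError exactly when item ∉ curr;
-- in every inner call item was just added, and at top level Pre_ requires membership, so
-- PySem.Set.discard is exact here.  goAList is the 'for' loop.
mutual
def goA (recipes : List (List String × List String)) : Nat → String → List String → List String
  | f, item, curr =>
    match find_ingredient recipes item with
    | none => curr
    | some l =>
      if l = [] then curr
      else
        match f with
        | 0 => curr  -- fuel guard only, unreachable under Pre_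
        | Nat.succ f' => goAList recipes f' l (PySem.Set.discard curr item)
termination_by f _ _ => (f, 0)

def goAList (recipes : List (List String × List String)) : Nat → List String → List String → List String
  | _, [], curr => curr
  | f, g :: gs, curr => goAList recipes f gs (goA recipes f g (PySem.Set.add curr g))
termination_by f l _ => (f, l.length + 1)
end

def get_ingredients_helper (final_item : String) (recipes : List (List String × List String)) (curr : List String) : List String :=
  goA recipes (fuelBound recipes) final_item curr

-- ===== PORT B =====
-- Largest ingredient-list length; only used by runB's termination measure.
def maxW (recipes : List (List String × List String)) : Nat :=
  recipes.foldr (fun r acc => max r.1.length acc) 0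

lemma find_ingredient_length {recipes : List (List String × List String)} {item : String} {l : List String}
    (h : find_ingredient recipes item = some l) : l.length ≤ maxW recipes := by
  induction recipes with
  | nil => simp [find_ingredient] at h
  | cons r rest ih =>
    rw [find_ingredient] at h
    by_cases hm : item ∈ r.2
    · simp [hm] at h
      simp [maxW, ← h]
    · simp [hm] at h
      exact le_trans (ih h) (by simp [maxW])

-- runB = Source B's while-loop over the stack; the list head is the stack top (Source B pops from the
-- end and extends with reversed(r), which is the same order).  Each frame carries a fuel budget,
-- a pure totality guard mirroring goA's (unreachable under Pre_); curr.add/curr.remove of the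
-- just-added item are exact as Set.add/Set.discard.
def runB (recipes : List (List String × List String)) : List (String × Nat) → List String → List String
  | [], curr => curr
  | (item, f) :: rest, curr =>
    let c1 := PySem.Set.add curr item
    match hf : find_ingredient recipes item with
    | none => runB recipes rest c1
    | some l =>
      if hl : l = [] then runB recipes rest c1
      else
        match f with
        | 0 => runB recipes rest c1  -- fuel guard only, unreachable under Pre_
        | Nat.succ f' => runB recipes (l.map (fun g => (g, f')) ++ rest) (PySem.Set.discard c1 item)
termination_by stack _ => (stack.map (fun p => (maxW recipes + 1) ^ p.2)).sum
decreasing_by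
  · simp
  · simp
  · simp
  · simp only [List.map_cons, List.sum_cons, List.map_append, List.sum_append, List.map_map,
      Function.comp_def, List.map_const', List.sum_replicate, smul_eq_mul, Nat.succ_eq_add_one]
    have hc : 0 < (maxW recipes + 1) ^ f' := pow_pos (Nat.succ_pos _) _
    have h1 : l.length < maxW recipes + 1 := Nat.lt_succ_of_le (find_ingredient_length hf)
    have hlt : l.length * (maxW recipes + 1) ^ f' < (maxW recipes + 1) ^ (f' + 1) := by
      rw [pow_succ']
      exact (Nat.mul_lt_mul_right hc).mpr h1
    omega

def get_ingredients_helper_alt (final_item : String) (recipes : List (List String × List String)) (curr : List String) : List String :=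
  match find_ingredient recipes final_item with
  | none => curr
  | some l =>
    if l = [] then curr
    else runB recipes (l.map (fun g => (g, fuelBound recipes - 1))) (PySem.Set.discard curr final_item)

-- ===== PRECONDITION & SPEC =====
-- Helpers for Pre_ (independent of the ports): the expansion graph of the recipe list.
-- pvExpands x = ingredient list of the first recipe producing x, [] if none (Python's
-- falsiness of None and of [] coincide, so [] means 'x is not expanded').
def pvExpands (recipes : List (List String × List String)) (x : String) : List String :=
  match recipes.find? (fun r => r.2.contains x) with
  | some r => r.1
  | none => []

-- One breadth step of graph reachability, and the full reachable set (the iteration count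
-- bounds every shortest-path length in the expansion graph).
def pvStep (recipes : List (List String × List String)) (S : List String) : List String :=
  (S ++ S.flatMap (pvExpands recipes)).dedup

def pvReach (recipes : List (List String × List String)) (start : List String) : List String :=
  (pvStep recipes)^[(recipes.flatMap (fun r => r.2)).length + 2] start

-- Pre_ excludes exactly the inputs on which Python A raises: KeyError (final_item is
-- expandable but not in curr, so curr.remove fails) and RecursionError (some item
-- reachable from final_item in the expansion graph lies on a cycle).
def Pre_get_ingredients_helper (final_item : String) (recipes : List (List String × List String)) (curr : List String) : Prop :=
  (pvExpands recipes final_item ≠ [] → final_item ∈ curr) ∧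
  ∀ x ∈ pvReach recipes [final_item], x ∉ pvReach recipes (pvExpands recipes x)
instance (final_item : String) (recipes : List (List String × List String)) (curr : List String) : Decidable (Pre_get_ingredients_helper final_item recipes curr) := by unfold Pre_get_ingredients_helper; infer_instance

def pvWitness_get_ingredients_helper : String × (List (List String × List String)) × List String :=
  ("cake", [(["flour", "egg"], ["cake"])], ["cake"])

def Spec_get_ingredients_helper (final_item : String) (recipes : List (List String × List String)) (curr : List String) (out : List String) : Prop := out = get_ingredients_helper_alt final_item recipes curr
instance (final_item : String) (recipes : List (List String × List String)) (curr : List String) (out : List String) : Decidable (Spec_get_ingredients_helper final_item recipes curr out) := by unfold Spec_get_ingredients_helper; infer_instance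

-- ===== CLAIM (what is proved, stated in full; the proofs are below) =====
def Claim_equal_get_ingredients_helper : Prop := ∀ (final_item : String) (recipes : List (List String × List String)) (curr : List String), Dom_get_ingredients_helper final_item recipes curr → Pre_get_ingredients_helper final_item recipes curr → Spec_get_ingredients_helper final_item recipes curr (get_ingredients_helper final_item recipes curr)

-- ===== LEMMAS AND PROOFS =====

lemma runB_nil (recipes : List (List String × List String)) (curr : List String) :
    runB recipes [] curr = curr := by rw [runB]

lemma runB_cons_none (recipes : List (List String × List String)) {item : String} (f : Nat)
    (rest : List (String × Nat)) (curr : List String)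
    (h : find_ingredient recipes item = none) :
    runB recipes ((item, f) :: rest) curr = runB recipes rest (PySem.Set.add curr item) := by
  rw [runB]; split <;> simp_all

lemma runB_cons_some_nil (recipes : List (List String × List String)) {item : String} (f : Nat)
    (rest : List (String × Nat)) (curr : List String)
    (h : find_ingredient recipes item = some []) :
    runB recipes ((item, f) :: rest) curr = runB recipes rest (PySem.Set.add curr item) := by
  rw [runB]; split <;> simp_all

lemma runB_cons_some_zero (recipes : List (List String × List String)) {item : String}
    (rest : List (String × Nat)) (curr : List String) {l : List String}
    (h : find_ingredient recipes item = some l) (hl : l ≠ []) :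
    runB recipes ((item, 0) :: rest) curr = runB recipes rest (PySem.Set.add curr item) := by
  rw [runB]; split <;> simp_all

lemma runB_cons_some_succ (recipes : List (List String × List String)) {item : String} (f' : Nat)
    (rest : List (String × Nat)) (curr : List String) {l : List String}
    (h : find_ingredient recipes item = some l) (hl : l ≠ []) :
    runB recipes ((item, f' + 1) :: rest) curr =
      runB recipes (l.map (fun g => (g, f')) ++ rest)
        (PySem.Set.discard (PySem.Set.add curr item) item) := by
  rw [runB]; split <;> simp_all

-- Reduction lemmas for goA / goAList (A's recursion) in each branch.
lemma goA_none {recipes : List (List String × List String)} (f : Nat) {item : String} (curr : List String)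
    (h : find_ingredient recipes item = none) : goA recipes f item curr = curr := by
  rw [goA, h]

lemma goA_some_nil {recipes : List (List String × List String)} (f : Nat) {item : String} (curr : List String)
    (h : find_ingredient recipes item = some []) : goA recipes f item curr = curr := by
  rw [goA, h]; simp

lemma goA_zero {recipes : List (List String × List String)} {item : String} (curr : List String)
    {l : List String} (h : find_ingredient recipes item = some l) (hl : l ≠ []) :
    goA recipes 0 item curr = curr := by
  rw [goA, h]; simp [hl]

lemma goA_succ {recipes : List (List String × List String)} (f' : Nat) {item : String} (curr : List String)
    {l : List String} (h : find_ingredient recipes item = some l) (hl : l ≠ []) :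
    goA recipes (f' + 1) item curr = goAList recipes f' l (PySem.Set.discard curr item) := by
  rw [goA, h]; simp [hl]

lemma goAList_nil (recipes : List (List String × List String)) (f : Nat) (curr : List String) :
    goAList recipes f [] curr = curr := by rw [goAList]

lemma goAList_cons (recipes : List (List String × List String)) (f : Nat) (g : String)
    (gs : List String) (curr : List String) :
    goAList recipes f (g :: gs) curr = goAList recipes f gs (goA recipes f g (PySem.Set.add curr g)) := by
  rw [goAList]

-- One stack frame behaves like one recursive call of A (and a frame list like A's for-loop).
lemma stack_sim (recipes : List (List String × List String)) : ∀ f : Nat,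
    (∀ (x : String) (rest : List (String × Nat)) (curr : List String),
      runB recipes ((x, f) :: rest) curr = runB recipes rest (goA recipes f x (PySem.Set.add curr x)))
    ∧ (∀ (l : List String) (rest : List (String × Nat)) (curr : List String),
      runB recipes (l.map (fun g => (g, f)) ++ rest) curr = runB recipes rest (goAList recipes f l curr)) := by
  intro f
  induction f with
  | zero =>
    have key : ∀ (x : String) (rest : List (String × Nat)) (curr : List String),
        runB recipes ((x, 0) :: rest) curr = runB recipes rest (goA recipes 0 x (PySem.Set.add curr x)) := by
      intro x rest curr
      cases hfind : find_ingredient recipes x with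
      | none => rw [runB_cons_none _ _ _ _ hfind, goA_none _ _ hfind]
      | some l =>
        by_cases hl : l = []
        · subst hl; rw [runB_cons_some_nil _ _ _ _ hfind, goA_some_nil _ _ hfind]
        · rw [runB_cons_some_zero _ _ _ hfind hl, goA_zero _ hfind hl]
    refine ⟨key, ?_⟩
    intro l
    induction l with
    | nil => intro rest curr; simp only [List.map_nil, List.nil_append, goAList_nil]
    | cons g gs ih =>
      intro rest curr
      simp only [List.map_cons, List.cons_append]
      rw [key, ih, ← goAList_cons]
  | succ f' ih =>
    have key : ∀ (x : String) (rest : List (String × Nat)) (curr : List String),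
        runB recipes ((x, f' + 1) :: rest) curr = runB recipes rest (goA recipes (f' + 1) x (PySem.Set.add curr x)) := by
      intro x rest curr
      cases hfind : find_ingredient recipes x with
      | none => rw [runB_cons_none _ _ _ _ hfind, goA_none _ _ hfind]
      | some l =>
        by_cases hl : l = []
        · subst hl; rw [runB_cons_some_nil _ _ _ _ hfind, goA_some_nil _ _ hfind]
        · rw [runB_cons_some_succ _ _ _ _ hfind hl, goA_succ _ _ hfind hl, ih.2]
    refine ⟨key, ?_⟩
    intro l
    induction l with
    | nil => intro rest curr; simp only [List.map_nil, List.nil_append, goAList_nil]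
    | cons g gs ih2 =>
      intro rest curr
      simp only [List.map_cons, List.cons_append]
      rw [key, ih2, ← goAList_cons]

-- ===== VERDICT (by name: the statement is the Claim_ definition above) =====
theorem get_ingredients_helper_spec : Claim_equal_get_ingredients_helper := by
  intro final_item recipes curr _ _
  unfold Spec_get_ingredients_helper get_ingredients_helper get_ingredients_helper_alt
  cases hfind : find_ingredient recipes final_item with
  | none => rw [goA_none _ _ hfind]
  | some l =>
    by_cases hl : l = []
    · subst hl; rw [goA_some_nil _ _ hfind]; simp
    · have hfuel : fuelBound recipes = (fuelBound recipes - 1) + 1 := by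
        unfold fuelBound; omega
      rw [hfuel, goA_succ _ _ hfind hl]
      have h := (stack_sim recipes (fuelBound recipes - 1)).2 l [] (PySem.Set.discard curr final_item)
      rw [List.append_nil, runB_nil] at h
      simp only [hl, if_false]
      exact h.symm
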